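-- pv_equiv track=rewrite | github.com/dwh649821599/M2EchoSeg | utils.py | create_lists_2
-- ===== SOURCE A (Python) =====
-- def create_lists_2(frame_len, N):
--     results = []
--
--     for i in range(frame_len):
--         result = [i]
--
--         near_area = sorted(list(set(range(i - N, i + N + 1))))
--         while near_area[0] < 0:
--             near_area = [i + 1 for i in near_area]
--
--         while near_area[-1] >= frame_len:
--             near_area = [i - 1 for i in near_area]
--
--         if i in near_area:
--             near_area.remove(i)
--
--         result.extend(near_area)
--         results.append(result)
--
--     return results
-- ===== SOURCE B (Python) =====
-- def create_lists_2(frame_len, N):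
--     # Closed-form clamped window: start = max(i-N,0), then shift down so the
--     # window end fits below frame_len; no iterative one-step shifting.
--     results = []
--     for i in range(frame_len):
--         s = i - N if i - N > 0 else 0
--         e = s + 2 * N
--         if e >= frame_len:
--             s -= e - frame_len + 1
--             e = frame_len - 1
--         results.append([i] + [j for j in range(s, e + 1) if j != i])
--     return results
-- ===== Notes on version B (the rewrite author's own statement) =====
-- stated objective: faster
-- what changed: B computes each clamped window's start/end in closed form (max with 0, then one subtraction to fit below frame_len) and builds it with a single range+filter, instead of A's set/sort construction and one-step-at-a-time whole-list shifting loops.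
import Mathlib
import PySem

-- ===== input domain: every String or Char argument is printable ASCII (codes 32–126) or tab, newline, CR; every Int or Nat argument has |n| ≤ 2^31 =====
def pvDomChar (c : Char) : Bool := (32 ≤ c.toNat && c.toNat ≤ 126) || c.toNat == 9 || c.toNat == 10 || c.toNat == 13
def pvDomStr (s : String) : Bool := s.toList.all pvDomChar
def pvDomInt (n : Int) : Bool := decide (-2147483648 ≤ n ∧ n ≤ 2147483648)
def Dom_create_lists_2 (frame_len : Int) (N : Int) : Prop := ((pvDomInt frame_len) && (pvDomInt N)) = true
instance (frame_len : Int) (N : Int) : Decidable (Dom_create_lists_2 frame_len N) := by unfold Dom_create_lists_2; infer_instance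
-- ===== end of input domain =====

-- B replaces A's set/sort construction and one-element-at-a-time whole-list shifting loops
-- by a closed-form clamped window start/end (objective: faster).

-- ===== PORT A =====
-- `while near_area[0] < 0: near_area = [i + 1 for i in near_area]`
-- (on [] Python raises IndexError — excluded by Pre_; the [] branch is a dummy)
def pvShiftUp (xs : List Int) : List Int :=
  match xs with
  | [] => []
  | a :: rest =>
    if a < 0 then pvShiftUp ((a :: rest).map (· + 1)) else a :: rest
  termination_by (-(xs.headD 0)).toNat
  decreasing_by simp only [List.map_cons, List.headD_cons]; omega

-- `while near_area[-1] >= frame_len: near_area = [i - 1 for i in near_area]`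
def pvShiftDown (frame_len : Int) (xs : List Int) : List Int :=
  if frame_len ≤ xs.getLast?.getD (frame_len - 1) then
    pvShiftDown frame_len (xs.map (· - 1))
  else xs
  termination_by (xs.getLast?.getD (frame_len - 1) - (frame_len - 1)).toNat
  decreasing_by
    rename_i h
    simp only [List.map_subtype, List.unattach_attach] at *
    cases hx : xs.getLast? with
    | none => rw [hx] at h; simp at h
    | some b =>
      rw [hx] at h
      simp only [List.getLast?_map, hx, Option.map_some, Option.getD_some] at *
      omega

def create_lists_2 (frame_len : Int) (N : Int) : List (List Int) :=
  (PySem.List.pyRange 0 frame_len 1).foldl (fun results i =>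
    let result : List Int := [i]
    let na0 := PySem.List.sorted (PySem.Set.ofList (PySem.List.pyRange (i - N) (i + N + 1) 1)) id
    let na1 := pvShiftUp na0
    let na2 := pvShiftDown frame_len na1
    let na3 := if na2.contains i then (PySem.List.remove? na2 i).getD na2 else na2
    results ++ [result ++ na3]) []

-- ===== PORT B =====
def create_lists_2_alt (frame_len : Int) (N : Int) : List (List Int) :=
  (PySem.List.pyRange 0 frame_len 1).foldl (fun results i =>
    let s0 := if i - N > 0 then i - N else 0
    let e0 := s0 + 2 * N
    let s := if e0 ≥ frame_len then s0 - (e0 - frame_len + 1) else s0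
    let e := if e0 ≥ frame_len then frame_len - 1 else e0
    results ++ [i :: (PySem.List.pyRange s (e + 1) 1).filter (fun j => j != i)]) []

-- ===== PRECONDITION & SPEC =====
-- Pre_ excludes frame_len ≥ 1 with N < 0, where the neighbor range is empty and
-- A raises IndexError on near_area[0].
def Pre_create_lists_2 (frame_len : Int) (N : Int) : Prop := frame_len ≤ 0 ∨ 0 ≤ N
instance (frame_len : Int) (N : Int) : Decidable (Pre_create_lists_2 frame_len N) := by
  unfold Pre_create_lists_2; infer_instance

def pvWitness_create_lists_2 : Int × Int := (5, 2)

def Spec_create_lists_2 (frame_len : Int) (N : Int) (out : List (List Int)) : Prop := out = create_lists_2_alt frame_len N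
instance (frame_len : Int) (N : Int) (out : List (List Int)) : Decidable (Spec_create_lists_2 frame_len N out) := by unfold Spec_create_lists_2; infer_instance

-- ===== CLAIM (what is proved, stated in full; the proofs are below) =====
def Claim_equal_create_lists_2 : Prop := ∀ (frame_len : Int) (N : Int), Dom_create_lists_2 frame_len N → Pre_create_lists_2 frame_len N → Spec_create_lists_2 frame_len N (create_lists_2 frame_len N)

-- ===== LEMMAS AND PROOFS =====

lemma map_add_one_pyRange (a b : Int) :
    (PySem.List.pyRange a b 1).map (· + 1) = PySem.List.pyRange (a + 1) (b + 1) 1 := by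
  have h : (b + 1 - (a + 1)).toNat = (b - a).toNat := by omega
  simp [PySem.List.pyRange_one, h, List.map_map]
  intro k _
  omega

lemma map_sub_one_pyRange (a b : Int) :
    (PySem.List.pyRange a b 1).map (· - 1) = PySem.List.pyRange (a - 1) (b - 1) 1 := by
  have h : (b - 1 - (a - 1)).toNat = (b - a).toNat := by omega
  simp [PySem.List.pyRange_one, h, List.map_map]
  intro k _
  omega

lemma shiftUp_pyRange (k : Nat) : ∀ (a b : Int), a < b → (-a).toNat ≤ k →
    pvShiftUp (PySem.List.pyRange a b 1) =
      PySem.List.pyRange (max a 0) (b - a + max a 0) 1 := by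
  induction k with
  | zero =>
    intro a b hab hk
    have ha : 0 ≤ a := by omega
    rw [PySem.List.pyRange_one_cons hab, pvShiftUp.eq_def]
    simp [not_lt.mpr ha, ← PySem.List.pyRange_one_cons hab]
    rw [max_eq_left ha]
    congr 1
    omega
  | succ k ih =>
    intro a b hab hk
    by_cases ha : 0 ≤ a
    · rw [PySem.List.pyRange_one_cons hab, pvShiftUp.eq_def]
      simp [not_lt.mpr ha, ← PySem.List.pyRange_one_cons hab]
      rw [max_eq_left ha]
      congr 1
      omega
    · push_neg at ha
      rw [PySem.List.pyRange_one_cons hab, pvShiftUp.eq_def]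
      simp only [ha, if_pos]
      rw [← PySem.List.pyRange_one_cons hab, map_add_one_pyRange,
        ih (a + 1) (b + 1) (by omega) (by omega)]
      have h1 : max (a + 1) 0 = max a 0 := by omega
      have h2 : b + 1 - (a + 1) = b - a := by ring
      rw [h1, h2]

lemma getLast?_pyRange (a b : Int) (hab : a < b) :
    (PySem.List.pyRange a b 1).getLast? = some (b - 1) := by
  have h : PySem.List.pyRange a b 1 = PySem.List.pyRange a (b - 1) 1 ++ [b - 1] := by
    have := PySem.List.pyRange_one_succ_right (a := a) (b := b - 1) (by omega)
    simpa using this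
  rw [h]
  simp

lemma shiftDown_pyRange (k : Nat) : ∀ (F a b : Int), a < b → (b - F).toNat ≤ k →
    pvShiftDown F (PySem.List.pyRange a b 1) =
      PySem.List.pyRange (a - max 0 (b - F)) (b - max 0 (b - F)) 1 := by
  induction k with
  | zero =>
    intro F a b hab hk
    have hb : b ≤ F := by omega
    rw [pvShiftDown]
    simp [getLast?_pyRange a b hab, show ¬ F ≤ b - 1 by omega,
      max_eq_left (show b - F ≤ 0 by omega)]
  | succ k ih =>
    intro F a b hab hk
    by_cases hb : b ≤ F
    · rw [pvShiftDown]
      simp [getLast?_pyRange a b hab, show ¬ F ≤ b - 1 by omega,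
        max_eq_left (show b - F ≤ 0 by omega)]
    · push_neg at hb
      rw [pvShiftDown]
      simp only [getLast?_pyRange a b hab, Option.getD_some]
      rw [if_pos (by omega)]
      rw [map_sub_one_pyRange, ih F (a - 1) (b - 1) (by omega) (by omega)]
      have h1 : max 0 (b - 1 - F) = max 0 (b - F) - 1 := by omega
      have h2 : a - 1 - (max 0 (b - F) - 1) = a - max 0 (b - F) := by ring
      have h3 : b - 1 - (max 0 (b - F) - 1) = b - max 0 (b - F) := by ring
      rw [h1, h2, h3]

lemma filter_ne_of_not_mem (l : List Int) (i : Int) (h : i ∉ l) :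
    l.filter (fun j => j != i) = l := by
  apply List.filter_eq_self.mpr
  intro a ha
  simp only [bne_iff_ne, ne_eq]
  exact fun he => h (he ▸ ha)

lemma remove?_eq_filter (l : List Int) (i : Int) (hnd : l.Nodup) (hm : i ∈ l) :
    PySem.List.remove? l i = some (l.filter (fun j => j != i)) := by
  induction l with
  | nil => cases hm
  | cons a t ih =>
    rcases List.nodup_cons.mp hnd with ⟨hat, hndt⟩
    by_cases hai : a = i
    · subst hai
      simp [PySem.List.remove?, List.idxOf?_cons, filter_ne_of_not_mem t a hat]
    · have hit : i ∈ t := by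
        rcases List.mem_cons.mp hm with h | h
        · exact absurd h.symm hai
        · exact h
      have hrec := ih hndt hit
      simp only [PySem.List.remove?] at hrec ⊢
      rw [List.idxOf?_cons]
      rcases hx : List.idxOf? i t with _ | k
      · simp [hx] at hrec
      · simp only [hx, Option.map_some, Option.map_some] at hrec ⊢
        simp only [Option.some.injEq] at hrec
        simp [beq_iff_eq, hai, List.eraseIdx_cons_succ, hrec,
          List.filter_cons, bne_iff_ne, Ne.symm hai]

lemma remove_step (l : List Int) (i : Int) (hnd : l.Nodup) :
    (if l.contains i then (PySem.List.remove? l i).getD l else l) =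
      l.filter (fun j => j != i) := by
  by_cases hm : i ∈ l
  · have hc : l.contains i = true := by simpa using hm
    simp only [hc, if_true, remove?_eq_filter l i hnd hm, Option.getD_some]
  · have hc : l.contains i = false := by simpa using hm
    simp only [hc, Bool.false_eq_true, if_false, filter_ne_of_not_mem l i hm]

lemma sorted_set_pyRange (a b : Int) :
    PySem.List.sorted (PySem.Set.ofList (PySem.List.pyRange a b 1)) id =
      PySem.List.pyRange a b 1 := by
  apply PySem.List.sorted_eq_of_perm_of_pairwise_lt
  · apply (List.perm_ext_iff_of_nodup (PySem.List.nodup_pyRange_one a b)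
      (PySem.Set.nodup_ofList _)).mpr
    intro x
    rw [PySem.Set.mem_ofList]
  · simpa using PySem.List.pairwise_lt_pyRange_one a b

lemma body_eq (F N i : Int) (hN : 0 ≤ N) (hi : 0 ≤ i) (hiF : i < F) :
    (let result : List Int := [i]
     let na0 := PySem.List.sorted (PySem.Set.ofList (PySem.List.pyRange (i - N) (i + N + 1) 1)) id
     let na1 := pvShiftUp na0
     let na2 := pvShiftDown F na1
     let na3 := if na2.contains i then (PySem.List.remove? na2 i).getD na2 else na2
     result ++ na3) =
    (let s0 := if i - N > 0 then i - N else 0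
     let e0 := s0 + 2 * N
     let s := if e0 ≥ F then s0 - (e0 - F + 1) else s0
     let e := if e0 ≥ F then F - 1 else e0
     i :: (PySem.List.pyRange s (e + 1) 1).filter (fun j => j != i)) := by
  simp only
  rw [sorted_set_pyRange,
    shiftUp_pyRange ((-(i - N)).toNat) (i - N) (i + N + 1) (by omega) le_rfl]
  set s1 := max (i - N) 0 with hs1
  set b1 := i + N + 1 - (i - N) + s1 with hb1
  have hs1b1 : s1 < b1 := by omega
  rw [shiftDown_pyRange ((b1 - F).toNat) F s1 b1 hs1b1 le_rfl]
  have hnd := PySem.List.nodup_pyRange_one (s1 - max 0 (b1 - F)) (b1 - max 0 (b1 - F))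
  rw [remove_step _ i hnd]
  have hs0 : (if i - N > 0 then i - N else 0) = s1 := by
    simp only [hs1]; split <;> omega
  rw [hs0]
  by_cases hcl : s1 + 2 * N ≥ F
  · have hm : max 0 (b1 - F) = b1 - F := by omega
    simp only [hcl, if_pos, hm]
    have h1 : s1 - (b1 - F) = s1 - (s1 + 2 * N - F + 1) := by omega
    have h2 : b1 - (b1 - F) = F - 1 + 1 := by ring
    rw [h1, h2]
    simp
  · have hm : max 0 (b1 - F) = 0 := by omega
    simp only [hcl, if_neg, if_false, hm]
    have h1 : s1 - 0 = s1 := by ring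
    have h2 : b1 - 0 = s1 + 2 * N + 1 := by omega
    rw [h1, h2]
    simp

-- ===== VERDICT (by name: the statement is the Claim_ definition above) =====
theorem create_lists_2_spec : Claim_equal_create_lists_2 := by
  intro F N _ hpre
  unfold Spec_create_lists_2 create_lists_2 create_lists_2_alt
  rcases hpre with hF | hN
  · rw [PySem.List.pyRange_one_eq_nil hF]
    rfl
  · rw [PySem.List.foldl_append_singleton_eq_map, PySem.List.foldl_append_singleton_eq_map]
    simp only [List.nil_append]
    apply List.map_congr_left
    intro i hi
    rw [PySem.List.mem_pyRange_one] at hi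
    exact body_eq F N i hN hi.1 hi.2
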